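-- pv_equiv track=rewrite | github.com/aumkarringe/HerbWise | backend/agents/a2_science_validator.py | _build_items_text
-- ===== SOURCE A (Python) =====
-- def _build_items_text(a1_output: dict, group: str) -> str:
--     """Build a text summary of A1 items to validate based on group."""
--     if group == "full":
--         herbs  = "\n".join([f"- {h['name']}: {h.get('traditional_claim','')}"
--                             for h in a1_output.get("herbs", [])])
--         poses  = "\n".join([f"- {p['name']}: {p.get('traditional_claim','')}"
--                             for p in a1_output.get("yoga_poses", [])])
--         points = "\n".join([f"- {a['point_name']}: {a.get('traditional_claim','')}"
--                             for a in a1_output.get("acupressure_points", [])])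
--         return f"HERBS:\n{herbs}\n\nYOGA POSES:\n{poses}\n\nACUPRESSURE POINTS:\n{points}"
--
--     elif group == "herbs_only":
--         herbs = "\n".join([f"- {h['name']}: {h.get('traditional_claim','')}"
--                            for h in a1_output.get("herbs", [])])
--         return f"HERBS:\n{herbs}"
--
--     elif group == "breathing":
--         techniques = "\n".join([f"- {t['name']} ({t.get('type','')}): {t.get('traditional_benefit','')}"
--                                 for t in a1_output.get("breathing_techniques", [])])
--         breathing_herbs = a1_output.get("lung_herbs", a1_output.get("herbs", []))
--         herbs = "\n".join([f"- {h['name']}: {h.get('respiratory_benefit','')}"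
--                            for h in breathing_herbs])
--         return f"BREATHING TECHNIQUES:\n{techniques}\n\nLUNG HERBS:\n{herbs}"
--
--     elif group == "exercise":
--         warmup = "\n".join([f"- {p['name']}: {p.get('warmup_purpose','')}"
--                             for p in a1_output.get("warmup_poses", [])])
--         main   = "\n".join([f"- {p['name']}: {p.get('alignment_cues','')}"
--                             for p in a1_output.get("main_sequence_poses", [])])
--         cool   = "\n".join([f"- {p['name']}: {p.get('recovery_purpose','')}"
--                             for p in a1_output.get("cooldown_poses", [])])
--         recovery_herbs = a1_output.get("recovery_herbs", a1_output.get("herbs", []))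
--         herbs  = "\n".join([f"- {h['name']}: {h.get('recovery_benefit','')}"
--                 for h in recovery_herbs])
--         return (f"WARMUP:\n{warmup}\n\nMAIN SEQUENCE:\n{main}\n\n"
--                 f"COOLDOWN:\n{cool}\n\nRECOVERY HERBS:\n{herbs}")
--
--     return ""
-- ===== SOURCE B (Python) =====
-- # Table-driven renderer: one generic section formatter over a per-group descriptor table.
-- _SECTIONS = {
--     "full": [
--         ("HERBS", "herbs", None, "name", None, "traditional_claim"),
--         ("YOGA POSES", "yoga_poses", None, "name", None, "traditional_claim"),
--         ("ACUPRESSURE POINTS", "acupressure_points", None, "point_name", None, "traditional_claim"),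
--     ],
--     "herbs_only": [
--         ("HERBS", "herbs", None, "name", None, "traditional_claim"),
--     ],
--     "breathing": [
--         ("BREATHING TECHNIQUES", "breathing_techniques", None, "name", "type", "traditional_benefit"),
--         ("LUNG HERBS", "lung_herbs", "herbs", "name", None, "respiratory_benefit"),
--     ],
--     "exercise": [
--         ("WARMUP", "warmup_poses", None, "name", None, "warmup_purpose"),
--         ("MAIN SEQUENCE", "main_sequence_poses", None, "name", None, "alignment_cues"),
--         ("COOLDOWN", "cooldown_poses", None, "name", None, "recovery_purpose"),
--         ("RECOVERY HERBS", "recovery_herbs", "herbs", "name", None, "recovery_benefit"),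
--     ],
-- }
--
--
-- def _render_section(a1_output, header, key, fallback, name_field, type_field, value_field):
--     items = a1_output.get(key, a1_output.get(fallback, []) if fallback is not None else [])
--     lines = []
--     for item in items:
--         entry = "- " + item[name_field]
--         if type_field is not None:
--             entry += " (" + item.get(type_field, "") + ")"
--         entry += ": " + item.get(value_field, "")
--         lines.append(entry)
--     return header + ":\n" + "\n".join(lines)
--
--
-- def _build_items_text(a1_output: dict, group: str) -> str:
--     sections = _SECTIONS.get(group)
--     if sections is None:
--         return ""
--     return "\n\n".join(_render_section(a1_output, *sec) for sec in sections)
-- ===== Notes on version B (the rewrite author's own statement) =====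
-- stated objective: simpler
-- what changed: Replaces A's four hand-written per-group branches (each inlining its own f-string comprehensions and headers) by a single per-group descriptor table (header, source key, optional fallback key, name field, optional type field, value field) and one generic section renderer that the group's descriptors are folded through.
import Mathlib
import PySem

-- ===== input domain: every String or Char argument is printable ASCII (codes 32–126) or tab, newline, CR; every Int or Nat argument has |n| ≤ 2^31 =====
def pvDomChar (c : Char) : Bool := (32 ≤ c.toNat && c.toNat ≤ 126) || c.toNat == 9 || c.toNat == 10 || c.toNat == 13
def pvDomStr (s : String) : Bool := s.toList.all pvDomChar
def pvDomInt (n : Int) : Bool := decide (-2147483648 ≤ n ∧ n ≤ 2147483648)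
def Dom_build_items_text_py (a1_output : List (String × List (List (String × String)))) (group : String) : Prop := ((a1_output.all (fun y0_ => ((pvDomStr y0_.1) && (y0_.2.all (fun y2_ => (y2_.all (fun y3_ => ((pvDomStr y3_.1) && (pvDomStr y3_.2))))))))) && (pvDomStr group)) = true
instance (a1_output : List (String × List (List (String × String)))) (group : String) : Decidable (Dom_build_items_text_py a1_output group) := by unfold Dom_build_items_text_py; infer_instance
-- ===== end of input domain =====

-- B replaces A's four hand-written per-group branches by one generic section renderer driven by
-- a per-group descriptor table (objective: simpler). Equivalence is over the return value only.

-- ===== PORT A =====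
-- A-side: literal transliteration of each branch; required subscripts h['name'] are total via
-- (get? …).getD "", exact on Pre_ (which demands the key be present — Python raises KeyError otherwise).
def build_items_text_py (a1_output : List (String × List (List (String × String)))) (group : String) : String :=
  let d := PySem.Dict.mk a1_output
  if group == "full" then
    let herbs := PySem.Str.join "\n" ((d.getD "herbs" []).map (fun h =>
      "- " ++ (((PySem.Dict.mk h).get? "name").getD "") ++ ": " ++ ((PySem.Dict.mk h).getD "traditional_claim" "")))
    let poses := PySem.Str.join "\n" ((d.getD "yoga_poses" []).map (fun p =>
      "- " ++ (((PySem.Dict.mk p).get? "name").getD "") ++ ": " ++ ((PySem.Dict.mk p).getD "traditional_claim" "")))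
    let points := PySem.Str.join "\n" ((d.getD "acupressure_points" []).map (fun a =>
      "- " ++ (((PySem.Dict.mk a).get? "point_name").getD "") ++ ": " ++ ((PySem.Dict.mk a).getD "traditional_claim" "")))
    "HERBS:\n" ++ herbs ++ "\n\nYOGA POSES:\n" ++ poses ++ "\n\nACUPRESSURE POINTS:\n" ++ points
  else if group == "herbs_only" then
    let herbs := PySem.Str.join "\n" ((d.getD "herbs" []).map (fun h =>
      "- " ++ (((PySem.Dict.mk h).get? "name").getD "") ++ ": " ++ ((PySem.Dict.mk h).getD "traditional_claim" "")))
    "HERBS:\n" ++ herbs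
  else if group == "breathing" then
    let techniques := PySem.Str.join "\n" ((d.getD "breathing_techniques" []).map (fun t =>
      "- " ++ (((PySem.Dict.mk t).get? "name").getD "") ++ " (" ++ ((PySem.Dict.mk t).getD "type" "") ++ "): " ++ ((PySem.Dict.mk t).getD "traditional_benefit" "")))
    let breathing_herbs := d.getD "lung_herbs" (d.getD "herbs" [])
    let herbs := PySem.Str.join "\n" (breathing_herbs.map (fun h =>
      "- " ++ (((PySem.Dict.mk h).get? "name").getD "") ++ ": " ++ ((PySem.Dict.mk h).getD "respiratory_benefit" "")))
    "BREATHING TECHNIQUES:\n" ++ techniques ++ "\n\nLUNG HERBS:\n" ++ herbs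
  else if group == "exercise" then
    let warmup := PySem.Str.join "\n" ((d.getD "warmup_poses" []).map (fun p =>
      "- " ++ (((PySem.Dict.mk p).get? "name").getD "") ++ ": " ++ ((PySem.Dict.mk p).getD "warmup_purpose" "")))
    let main := PySem.Str.join "\n" ((d.getD "main_sequence_poses" []).map (fun p =>
      "- " ++ (((PySem.Dict.mk p).get? "name").getD "") ++ ": " ++ ((PySem.Dict.mk p).getD "alignment_cues" "")))
    let cool := PySem.Str.join "\n" ((d.getD "cooldown_poses" []).map (fun p =>
      "- " ++ (((PySem.Dict.mk p).get? "name").getD "") ++ ": " ++ ((PySem.Dict.mk p).getD "recovery_purpose" "")))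
    let recovery_herbs := d.getD "recovery_herbs" (d.getD "herbs" [])
    let herbs := PySem.Str.join "\n" (recovery_herbs.map (fun h =>
      "- " ++ (((PySem.Dict.mk h).get? "name").getD "") ++ ": " ++ ((PySem.Dict.mk h).getD "recovery_benefit" "")))
    "WARMUP:\n" ++ warmup ++ "\n\nMAIN SEQUENCE:\n" ++ main ++ "\n\nCOOLDOWN:\n" ++ cool ++ "\n\nRECOVERY HERBS:\n" ++ herbs
  else
    ""

-- ===== PORT B =====
-- a section descriptor: (header, source key, optional fallback key, name field, optional type field, value field)
def pvSections (group : String) : Option (List (String × String × Option String × String × Option String × String)) :=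
  (PySem.Dict.mk [
    ("full", [("HERBS", "herbs", none, "name", none, "traditional_claim"),
              ("YOGA POSES", "yoga_poses", none, "name", none, "traditional_claim"),
              ("ACUPRESSURE POINTS", "acupressure_points", none, "point_name", none, "traditional_claim")]),
    ("herbs_only", [("HERBS", "herbs", none, "name", none, "traditional_claim")]),
    ("breathing", [("BREATHING TECHNIQUES", "breathing_techniques", none, "name", some "type", "traditional_benefit"),
                   ("LUNG HERBS", "lung_herbs", some "herbs", "name", none, "respiratory_benefit")]),
    ("exercise", [("WARMUP", "warmup_poses", none, "name", none, "warmup_purpose"),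
                  ("MAIN SEQUENCE", "main_sequence_poses", none, "name", none, "alignment_cues"),
                  ("COOLDOWN", "cooldown_poses", none, "name", none, "recovery_purpose"),
                  ("RECOVERY HERBS", "recovery_herbs", some "herbs", "name", none, "recovery_benefit")])]).get? group

def pvRenderSection (a1_output : List (String × List (List (String × String))))
    (sec : String × String × Option String × String × Option String × String) : String :=
  let (header, key, fallback, name_field, type_field, value_field) := sec
  let items := (PySem.Dict.mk a1_output).getD key
    (match fallback with
     | some f => (PySem.Dict.mk a1_output).getD f []
     | none => [])
  let lines := items.map (fun item =>
    let e := "- " ++ (((PySem.Dict.mk item).get? name_field).getD "")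
    let e := match type_field with
      | some t => e ++ " (" ++ ((PySem.Dict.mk item).getD t "") ++ ")"
      | none => e
    e ++ ": " ++ ((PySem.Dict.mk item).getD value_field ""))
  header ++ ":\n" ++ PySem.Str.join "\n" lines

def build_items_text_py_alt (a1_output : List (String × List (List (String × String)))) (group : String) : String :=
  match pvSections group with
  | none => ""
  | some secs => PySem.Str.join "\n\n" (secs.map (pvRenderSection a1_output))

-- ===== PRECONDITION & SPEC =====
-- Pre_ excludes exactly the inputs on which Python A raises KeyError: a rendered item missing its
-- required name / point_name field for the given group (B raises there too).
def pvAllHave (field : String) (items : List (List (String × String))) : Bool :=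
  items.all (fun h => ((PySem.Dict.mk h).get? field).isSome)

def Pre_build_items_text_py (a1_output : List (String × List (List (String × String)))) (group : String) : Prop :=
  (let d := PySem.Dict.mk a1_output
   if group == "full" then
     pvAllHave "name" (d.getD "herbs" []) && pvAllHave "name" (d.getD "yoga_poses" []) &&
       pvAllHave "point_name" (d.getD "acupressure_points" [])
   else if group == "herbs_only" then
     pvAllHave "name" (d.getD "herbs" [])
   else if group == "breathing" then
     pvAllHave "name" (d.getD "breathing_techniques" []) &&
       pvAllHave "name" (d.getD "lung_herbs" (d.getD "herbs" []))
   else if group == "exercise" then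
     pvAllHave "name" (d.getD "warmup_poses" []) && pvAllHave "name" (d.getD "main_sequence_poses" []) &&
       pvAllHave "name" (d.getD "cooldown_poses" []) &&
       pvAllHave "name" (d.getD "recovery_herbs" (d.getD "herbs" []))
   else true) = true

instance (a1_output : List (String × List (List (String × String)))) (group : String) : Decidable (Pre_build_items_text_py a1_output group) := by unfold Pre_build_items_text_py; infer_instance

def pvWitness_build_items_text_py : (List (String × List (List (String × String)))) × String :=
  ([("herbs", [[("name", "Mint"), ("traditional_claim", "calming")]])], "herbs_only")

def Spec_build_items_text_py (a1_output : List (String × List (List (String × String)))) (group : String) (out : String) : Prop := out = build_items_text_py_alt a1_output group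
instance (a1_output : List (String × List (List (String × String)))) (group : String) (out : String) : Decidable (Spec_build_items_text_py a1_output group out) := by unfold Spec_build_items_text_py; infer_instance

-- ===== CLAIM (what is proved, stated in full; the proofs are below) =====
def Claim_equal_build_items_text_py : Prop := ∀ (a1_output : List (String × List (List (String × String)))) (group : String), Dom_build_items_text_py a1_output group → Pre_build_items_text_py a1_output group → Spec_build_items_text_py a1_output group (build_items_text_py a1_output group)

-- ===== LEMMAS AND PROOFS =====

-- ===== VERDICT (by name: the statement is the Claim_ definition above) =====
theorem build_items_text_py_spec : Claim_equal_build_items_text_py := by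
  intro a1 group _ _
  unfold Spec_build_items_text_py build_items_text_py build_items_text_py_alt pvSections
  by_cases h1 : group = "full"
  · subst h1
    rw [← String.toList_inj]
    simp [pvRenderSection, PySem.Dict.get?_mk_cons, PySem.Str.toList_join,
      PySem.Chars.join_cons_cons, PySem.Chars.join_singleton, List.map_map, List.append_assoc]
  · by_cases h2 : group = "herbs_only"
    · subst h2
      rw [← String.toList_inj]
      simp [pvRenderSection, PySem.Dict.get?_mk_cons, PySem.Str.toList_join,
        PySem.Chars.join_singleton, List.map_map]
    · by_cases h3 : group = "breathing"
      · subst h3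
        rw [← String.toList_inj]
        simp [pvRenderSection, PySem.Dict.get?_mk_cons, PySem.Str.toList_join,
          PySem.Chars.join_cons_cons, PySem.Chars.join_singleton,
          List.map_map, List.append_assoc]
        refine congrArg _ (List.map_congr_left fun t _ => ?_)
        simp [Function.comp, String.toList_append, List.append_assoc,
          show "): ".toList = ")".toList ++ ": ".toList from rfl]
      · by_cases h4 : group = "exercise"
        · subst h4
          rw [← String.toList_inj]
          simp [pvRenderSection, PySem.Dict.get?_mk_cons, PySem.Str.toList_join,
            PySem.Chars.join_cons_cons, PySem.Chars.join_singleton, List.map_map,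
            List.append_assoc]
        · simp [PySem.Dict.get?, beq_iff_eq, h1, h2, h3, h4,
            Ne.symm h1, Ne.symm h2, Ne.symm h3, Ne.symm h4]
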